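-- pv_equiv track=rewrite | github.com/axemachina/ALSARA | servers/elevenlabs_server.py | _get_phonetic_spelling
-- ===== SOURCE A (Python) =====
-- def _get_phonetic_spelling(term: str) -> str:
--     """Generate phonetic spelling for medical terms."""
--     # Basic phonetic rules for medical terms
--     # This could be enhanced with a medical pronunciation dictionary
--
--     phonetic_map = {
--         "amyotrophic": "AM-ee-oh-TROH-fik",
--         "lateral": "LAT-er-al",
--         "sclerosis": "skleh-ROH-sis",
--         "tdp-43": "T-D-P forty-three",
--         "riluzole": "RIL-you-zole",
--         "edaravone": "ed-AR-a-vone",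
--         "tofersen": "TOE-fer-sen",
--         "neurofilament": "NUR-oh-FIL-a-ment",
--         "astrocyte": "AS-tro-site",
--         "oligodendrocyte": "oh-li-go-DEN-dro-site"
--     }
--
--     term_lower = term.lower()
--     if term_lower in phonetic_map:
--         return phonetic_map[term_lower]
--
--     # Basic syllable breakdown for unknown terms
--     # This is very simplified and could be improved
--     syllables = []
--     current = ""
--     for char in term:
--         if char in "aeiouAEIOU" and current:
--             syllables.append(current + char)
--             current = ""
--         else:
--             current += char
--     if current:
--         syllables.append(current)
--
--     return "-".join(syllables).upper()
-- ===== SOURCE B (Python) =====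
-- def _get_phonetic_spelling(term: str) -> str:
--     """Generate phonetic spelling for medical terms."""
--     phonetic_map = {
--         "amyotrophic": "AM-ee-oh-TROH-fik",
--         "lateral": "LAT-er-al",
--         "sclerosis": "skleh-ROH-sis",
--         "tdp-43": "T-D-P forty-three",
--         "riluzole": "RIL-you-zole",
--         "edaravone": "ed-AR-a-vone",
--         "tofersen": "TOE-fer-sen",
--         "neurofilament": "NUR-oh-FIL-a-ment",
--         "astrocyte": "AS-tro-site",
--         "oligodendrocyte": "oh-li-go-DEN-dro-site"
--     }
--
--     term_lower = term.lower()
--     if term_lower in phonetic_map: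
--         return phonetic_map[term_lower]
--
--     # Two-pointer tokenizer: each syllable is one lead character, a run of
--     # non-vowels, and (when one follows) a single closing vowel.
--     vowels = set("aeiouAEIOU")
--     syllables = []
--     i, n = 0, len(term)
--     while i < n:
--         j = i + 1
--         while j < n and term[j] not in vowels:
--             j += 1
--         if j < n:
--             j += 1  # include the closing vowel
--         syllables.append(term[i:j])
--         i = j
--
--     return "-".join(syllables).upper()
-- ===== Notes on version B (the rewrite author's own statement) =====
-- stated objective: alternative
-- what changed: Replaced the character-accumulator loop (building 'current' char by char and flushing it on each closing vowel) with a two-pointer tokenizer that, per syllable, advances an index over the run of non-vowels and slices the syllable out in one step; the dict lookup is kept.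
import Mathlib
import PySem

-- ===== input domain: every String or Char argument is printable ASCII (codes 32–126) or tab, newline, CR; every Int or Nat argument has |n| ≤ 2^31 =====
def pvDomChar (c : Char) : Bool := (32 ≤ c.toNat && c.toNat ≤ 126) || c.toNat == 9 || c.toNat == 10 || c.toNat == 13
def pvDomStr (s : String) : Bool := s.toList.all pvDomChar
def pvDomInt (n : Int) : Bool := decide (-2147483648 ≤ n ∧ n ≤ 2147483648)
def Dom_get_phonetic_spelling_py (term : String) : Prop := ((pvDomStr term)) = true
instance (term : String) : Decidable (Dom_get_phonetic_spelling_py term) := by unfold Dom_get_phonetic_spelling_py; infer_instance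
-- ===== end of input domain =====

-- B replaces A's character-accumulator syllable loop by a two-pointer/slice tokenizer (alternative, same cost).

-- ===== PORT A =====
-- the loop: for char in term: if char in "aeiouAEIOU" and current: flush current+char else current += char; trailing current flushed
def aLoop : List Char → List (List Char) → List Char → List (List Char)
  | [], syll, cur => if cur.isEmpty then syll else syll ++ [cur]
  | c :: cs, syll, cur =>
    if ("aeiouAEIOU".toList.contains c && !cur.isEmpty) then
      aLoop cs (syll ++ [cur ++ [c]]) []
    else
      aLoop cs syll (cur ++ [c])

def get_phonetic_spelling_py (term : String) : String :=
  let phonetic_map : PySem.Dict String String := PySem.Dict.ofList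
    [("amyotrophic", "AM-ee-oh-TROH-fik"), ("lateral", "LAT-er-al"),
     ("sclerosis", "skleh-ROH-sis"), ("tdp-43", "T-D-P forty-three"),
     ("riluzole", "RIL-you-zole"), ("edaravone", "ed-AR-a-vone"),
     ("tofersen", "TOE-fer-sen"), ("neurofilament", "NUR-oh-FIL-a-ment"),
     ("astrocyte", "AS-tro-site"), ("oligodendrocyte", "oh-li-go-DEN-dro-site")]
  let term_lower := PySem.Str.lower term
  match phonetic_map.get? term_lower with
  | some v => v
  | none => PySem.Str.upper (PySem.Str.join "-" ((aLoop term.toList [] []).map String.ofList))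

-- ===== PORT B =====
-- term[j] not in vowels
def nonVowelB (c : Char) : Bool := !("aeiouAEIOU".toList.contains c)

-- the while loop: lead char, run of non-vowels (takeWhile/dropWhile = the inner j loop),
-- plus the closing vowel when one follows; slice appended, continue at j
def tokB : List Char → List (List Char)
  | [] => []
  | c :: rest =>
    match h : rest.dropWhile nonVowelB with
    | [] => [c :: rest.takeWhile nonVowelB]
    | v :: rest' => (c :: (rest.takeWhile nonVowelB ++ [v])) :: tokB rest'
  termination_by l => l.length
  decreasing_by
    have hle := List.length_dropWhile_le (p := nonVowelB) (l := rest)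
    rw [h] at hle
    simp at hle ⊢
    omega

def get_phonetic_spelling_py_alt (term : String) : String :=
  let phonetic_map : PySem.Dict String String := PySem.Dict.ofList
    [("amyotrophic", "AM-ee-oh-TROH-fik"), ("lateral", "LAT-er-al"),
     ("sclerosis", "skleh-ROH-sis"), ("tdp-43", "T-D-P forty-three"),
     ("riluzole", "RIL-you-zole"), ("edaravone", "ed-AR-a-vone"),
     ("tofersen", "TOE-fer-sen"), ("neurofilament", "NUR-oh-FIL-a-ment"),
     ("astrocyte", "AS-tro-site"), ("oligodendrocyte", "oh-li-go-DEN-dro-site")]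
  let term_lower := PySem.Str.lower term
  match phonetic_map.get? term_lower with
  | some v => v
  | none => PySem.Str.upper (PySem.Str.join "-" ((tokB term.toList).map String.ofList))

-- ===== PRECONDITION & SPEC =====
def Spec_get_phonetic_spelling_py (term : String) (out : String) : Prop := out = get_phonetic_spelling_py_alt term
instance (term : String) (out : String) : Decidable (Spec_get_phonetic_spelling_py term out) := by unfold Spec_get_phonetic_spelling_py; infer_instance

-- ===== CLAIM (what is proved, stated in full; the proofs are below) =====
def Claim_equal_get_phonetic_spelling_py : Prop := ∀ (term : String), Dom_get_phonetic_spelling_py term → Spec_get_phonetic_spelling_py term (get_phonetic_spelling_py term)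

-- ===== LEMMAS AND PROOFS =====

-- mid-token continuation of B's tokenizer: 'cur' chars already consumed into the open syllable
def tokCont (cur : List Char) (cs : List Char) : List (List Char) :=
  match cs.dropWhile nonVowelB with
  | [] => [cur ++ cs.takeWhile nonVowelB]
  | v :: rest' => (cur ++ cs.takeWhile nonVowelB ++ [v]) :: tokB rest'

theorem tokB_cons_eq_tokCont (c : Char) (cs : List Char) :
    tokB (c :: cs) = tokCont [c] cs := by
  rw [tokB, tokCont]
  cases h : cs.dropWhile nonVowelB <;> simp [h]

theorem aLoop_eq (cs : List Char) : ∀ (syll : List (List Char)) (cur : List Char),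
    aLoop cs syll cur = syll ++ (if cur.isEmpty then tokB cs else tokCont cur cs) := by
  induction cs with
  | nil =>
    intro syll cur
    cases cur <;> simp [aLoop, tokB, tokCont]
  | cons c cs ih =>
    intro syll cur
    cases cur with
    | nil =>
      simp [aLoop, ih, tokB_cons_eq_tokCont]
    | cons d ds =>
      by_cases hv : ("aeiouAEIOU".toList.contains c) = true
      · -- vowel closes the open syllable
        have hnv : nonVowelB c = false := by unfold nonVowelB; rw [hv]; rfl
        simp only [aLoop, hv, Bool.true_and, List.isEmpty_cons, Bool.not_false, if_true]
        rw [ih]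
        simp [tokCont, hnv]
      · have hc : ("aeiouAEIOU".toList.contains c) = false := eq_false_of_ne_true hv
        have hnv : nonVowelB c = true := by unfold nonVowelB; rw [hc]; rfl
        simp only [aLoop, hc, Bool.false_and, Bool.false_eq_true, if_false]
        rw [ih]
        have hne : ((d :: ds) ++ [c]).isEmpty = false := by simp
        rw [hne]
        simp only [List.isEmpty_cons, if_false]
        simp only [tokCont, List.dropWhile_cons_of_pos hnv, List.takeWhile_cons_of_pos hnv]
        cases h : cs.dropWhile nonVowelB <;> simp [h]

-- ===== VERDICT (by name: the statement is the Claim_ definition above) =====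
theorem get_phonetic_spelling_py_spec : Claim_equal_get_phonetic_spelling_py := by
  intro term _
  unfold Spec_get_phonetic_spelling_py get_phonetic_spelling_py get_phonetic_spelling_py_alt
  cases h : (PySem.Dict.ofList
      [("amyotrophic", "AM-ee-oh-TROH-fik"), ("lateral", "LAT-er-al"),
       ("sclerosis", "skleh-ROH-sis"), ("tdp-43", "T-D-P forty-three"),
       ("riluzole", "RIL-you-zole"), ("edaravone", "ed-AR-a-vone"),
       ("tofersen", "TOE-fer-sen"), ("neurofilament", "NUR-oh-FIL-a-ment"),
       ("astrocyte", "AS-tro-site"), ("oligodendrocyte", "oh-li-go-DEN-dro-site")]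
       : PySem.Dict String String).get? (PySem.Str.lower term) with
  | some v => simp [h]
  | none => simp [h, aLoop_eq]
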